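-- pv_equiv track=rewrite | github.com/babky/hashing | src/simple-linear-functions/src/main/python/experiments/lib.py | lbin
-- ===== SOURCE A (Python) =====
-- def lbin(S, a, b, p, m):
-- 	T = {}
-- 	for x in S:
-- 		y = (a * x + b) % p % m
-- 		# print y
-- 		if y in T:
-- 			T[y] += 1
-- 		else:
-- 			T[y] = 1
--
-- 	m = 0
-- 	for y in T:
-- 		if m < T[y]:
-- 			m = T[y]
--
-- 	return m
-- ===== SOURCE B (Python) =====
-- def lbin(S, a, b, p, m):
--     ys = sorted((a * x + b) % p % m for x in S)
--     best = 0
--     run = 0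
--     prev = None
--     for y in ys:
--         if y == prev:
--             run += 1
--         else:
--             run = 1
--             prev = y
--         if run > best:
--             best = run
--     return best
-- ===== Notes on version B (the rewrite author's own statement) =====
-- stated objective: alternative
-- what changed: Replaces the dict histogram followed by a max-scan over the table with a sort of the hash values and a single run-length scan over the sorted list keeping the longest run.
import Mathlib
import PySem

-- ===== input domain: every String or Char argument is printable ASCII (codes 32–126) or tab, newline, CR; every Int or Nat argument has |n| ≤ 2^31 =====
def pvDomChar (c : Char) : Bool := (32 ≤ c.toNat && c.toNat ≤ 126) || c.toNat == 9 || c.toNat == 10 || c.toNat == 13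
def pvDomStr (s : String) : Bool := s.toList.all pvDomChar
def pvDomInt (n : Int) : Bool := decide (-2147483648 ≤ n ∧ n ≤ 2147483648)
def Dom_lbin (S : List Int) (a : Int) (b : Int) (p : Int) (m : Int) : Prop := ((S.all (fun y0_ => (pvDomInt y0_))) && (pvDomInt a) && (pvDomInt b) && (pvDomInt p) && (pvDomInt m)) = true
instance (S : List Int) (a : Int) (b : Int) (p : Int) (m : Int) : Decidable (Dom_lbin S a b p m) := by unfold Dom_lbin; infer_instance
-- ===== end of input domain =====

-- B replaces A's dict histogram + table max-scan by sorting the hash values and one run-length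
-- scan keeping the longest run (objective: alternative; equivalence of return values).

-- ===== PORT A =====
def lbin (S : List Int) (a : Int) (b : Int) (p : Int) (m : Int) : Int :=
  let T := S.foldl (fun T x =>
      let y := PySem.Int.mod (PySem.Int.mod (a * x + b) p) m
      if T.contains y then T.insert y (T.getD y 0 + 1) else T.insert y 1)
    PySem.Dict.empty
  T.keys.foldl (fun mx y => if mx < T.getD y 0 then T.getD y 0 else mx) 0

-- ===== PORT B =====
-- the loop 'for y in ys: …' of Source B, carrying (best, run, prev)
def scanRuns : List Int → Int → Int → Option Int → Int
  | [], best, _run, _prev => best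
  | y :: rest, best, run, prev =>
      let run' := if some y == prev then run + 1 else 1
      let prev' := if some y == prev then prev else some y
      let best' := if best < run' then run' else best
      scanRuns rest best' run' prev'

def lbin_alt (S : List Int) (a : Int) (b : Int) (p : Int) (m : Int) : Int :=
  let ys := PySem.List.sorted (S.map (fun x => PySem.Int.mod (PySem.Int.mod (a * x + b) p) m)) id
  scanRuns ys 0 0 none

-- ===== PRECONDITION & SPEC =====
-- Pre_ excludes exactly the inputs where Python raises ZeroDivisionError: a nonempty S with p = 0 or m = 0.
def Pre_lbin (S : List Int) (a : Int) (b : Int) (p : Int) (m : Int) : Prop :=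
  S = [] ∨ (p ≠ 0 ∧ m ≠ 0)
instance (S : List Int) (a : Int) (b : Int) (p : Int) (m : Int) : Decidable (Pre_lbin S a b p m) := by unfold Pre_lbin; infer_instance

def pvWitness_lbin : List Int × Int × Int × Int × Int := ([1, 2, 3, 9, 10], 2, 1, 7, 3)

def Spec_lbin (S : List Int) (a : Int) (b : Int) (p : Int) (m : Int) (out : Int) : Prop := out = lbin_alt S a b p m
instance (S : List Int) (a : Int) (b : Int) (p : Int) (m : Int) (out : Int) : Decidable (Spec_lbin S a b p m out) := by unfold Spec_lbin; infer_instance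

-- ===== CLAIM (what is proved, stated in full; the proofs are below) =====
def Claim_equal_lbin : Prop := ∀ (S : List Int) (a : Int) (b : Int) (p : Int) (m : Int), Dom_lbin S a b p m → Pre_lbin S a b p m → Spec_lbin S a b p m (lbin S a b p m)

-- ===== LEMMAS AND PROOFS =====

theorem getD_zero_of_not_contains (d : PySem.Dict Int Int) (y : Int) (h : ¬ d.contains y) :
    d.getD y 0 = 0 := by
  simp only [PySem.Dict.getD, PySem.Dict.contains, PySem.Dict.get?] at *
  rcases hf : List.find? (fun pr => pr.1 == y) d.items with _ | pr
  · rw [hf]; rfl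
  · have hm := List.mem_of_find?_eq_some hf
    have he := List.find?_some hf
    simp only [beq_iff_eq] at he
    exact absurd (List.any_eq_true.2 ⟨pr, hm, List.find?_some hf⟩) h

-- A's dict-building loop is exactly Counter(ys)
theorem build_eq_counter (ys : List Int) :
    ys.foldl (fun d y => if d.contains y then d.insert y (d.getD y 0 + 1) else d.insert y 1)
      PySem.Dict.empty = PySem.Dict.counter ys := by
  rw [← PySem.Dict.foldl_insert_getD_add_one_eq_counter]
  congr 1
  funext d y
  by_cases h : d.contains y
  · simp [h]
  · simp [h, getD_zero_of_not_contains d y h]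

theorem if_lt_eq_max (a b : Int) : (if a < b then b else a) = max a b := by
  simp only [max_def]; split_ifs <;> omega

theorem foldl_max_max (l : List Int) : ∀ a b : Int,
    l.foldl max (max a b) = max a (l.foldl max b) := by
  induction l with
  | nil => intro a b; simp
  | cons z t ih =>
      intro a b
      simp only [List.foldl_cons, max_assoc]
      exact ih a (max b z)

theorem foldl_max_mem (l : List Int) : ∀ a : Int, l.foldl max a = a ∨ l.foldl max a ∈ l := by
  induction l with
  | nil => intro a; simp
  | cons z t ih =>
      intro a
      simp only [List.foldl_cons]
      rcases ih (max a z) with h | h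
      · rcases max_choice a z with hm | hm
        · left; rw [h, hm]
        · right; rw [h, hm]; exact List.mem_cons_self ..
      · right; exact List.mem_cons_of_mem _ h

theorem foldl_max_congr (l1 l2 : List Int) (h : ∀ x, x ∈ l1 ↔ x ∈ l2) :
    l1.foldl max 0 = l2.foldl max 0 := by
  have key : ∀ (u v : List Int), (∀ x, x ∈ u ↔ x ∈ v) → u.foldl max 0 ≤ v.foldl max 0 := by
    intro u v huv
    rcases foldl_max_mem u 0 with h0 | hm
    · rw [h0]; exact (PySem.List.le_foldl_max v 0).1
    · exact (PySem.List.le_foldl_max v 0).2 _ ((huv _).1 hm)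
  exact le_antisymm (key l1 l2 h) (key l2 l1 (fun x => (h x).symm))

theorem foldl_max_const (l : List Int) (v : Int) (hv : 0 ≤ v) (hall : ∀ x ∈ l, x = v)
    (hne : l ≠ []) : l.foldl max 0 = v := by
  have hvle : v ≤ l.foldl max 0 := by
    rcases l with _ | ⟨z, t⟩
    · exact absurd rfl hne
    · have : z = v := hall z (List.mem_cons_self ..)
      exact this ▸ (PySem.List.le_foldl_max (z :: t) 0).2 z (List.mem_cons_self ..)
  rcases foldl_max_mem l 0 with h0 | hm
  · omega
  · exact le_antisymm (by rw [hall _ hm]) hvle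

-- max run length of a sorted list, by leading-run recursion (proof-side characterisation)
def mc : List Int → Int
  | [] => 0
  | z :: t => max (1 + (t.count z : Int)) (mc (t.dropWhile (· == z)))
termination_by l => l.length
decreasing_by
  simp only [List.length_cons]
  exact Nat.lt_succ_of_le (List.length_dropWhile_le _ _)

theorem mc_nonneg (zs : List Int) : 0 ≤ mc zs := by
  cases zs with
  | nil => simp [mc]
  | cons z t =>
      have : (1 : Int) + (t.count z : Int) ≤ mc (z :: t) := by
        simp only [mc]; exact le_max_left _ _
      have := Int.natCast_nonneg (t.count z)
      omega

theorem mc_cons_pos (z : Int) (t : List Int) : 1 ≤ mc (z :: t) := by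
  have : (1 : Int) + (t.count z : Int) ≤ mc (z :: t) := by
    simp only [mc]; exact le_max_left _ _
  have := Int.natCast_nonneg (t.count z)
  omega

-- counts in a sorted list split at the leading run
theorem sorted_count_split (t : List Int) (z : Int) (hp : List.Pairwise (· ≤ ·) (z :: t)) :
    t.count z = (t.takeWhile (· == z)).length ∧
      ∀ y : Int, y ≠ z → t.count y = (t.dropWhile (· == z)).count y := by
  induction t with
  | nil => simp
  | cons w t' ih =>
      by_cases hw : w = z
      · subst hw
        have hp' : List.Pairwise (· ≤ ·) (w :: t') :=
          hp.sublist ((List.sublist_cons_self w t').cons₂ w)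
        obtain ⟨h1, h2⟩ := ih hp'
        constructor
        · simp [h1]
        · intro y hy
          have hwy : (w == y) = false := by simp; omega
          simp [List.count_cons, hwy, h2 y hy]
      · have hzw : z ≤ w := (List.pairwise_cons.1 hp).1 w (List.mem_cons_self ..)
        have hzt : ∀ u ∈ t', z ≤ u := fun u hu =>
          (List.pairwise_cons.1 hp).1 u (List.mem_cons_of_mem _ hu)
        have hwt : ∀ u ∈ t', w ≤ u := fun u hu =>
          (List.pairwise_cons.1 ((List.pairwise_cons.1 hp).2)).1 u hu
        have hnz : z ∉ w :: t' := by
          intro hmem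
          rcases List.mem_cons.1 hmem with h | h
          · exact hw h.symm
          · have := hwt z h; omega
        constructor
        · have hwzf : (w == z) = false := by simp [hw]
          simp [List.count_eq_zero.2 hnz, hwzf]
        · intro y _
          have hwzf : (w == z) = false := by simp [hw]
          simp [hwzf]

theorem not_mem_dropWhile_sorted (t : List Int) (z : Int)
    (hp : List.Pairwise (· ≤ ·) (z :: t)) : z ∉ t.dropWhile (· == z) := by
  obtain ⟨h1, _⟩ := sorted_count_split t z hp
  have hsplit : t = t.takeWhile (· == z) ++ t.dropWhile (· == z) :=
    (List.takeWhile_append_dropWhile (p := (· == z)) (l := t)).symm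
  have hc : t.count z = (t.takeWhile (· == z)).count z + (t.dropWhile (· == z)).count z := by
    conv_lhs => rw [hsplit]
    exact List.count_append ..
  have htw : (t.takeWhile (· == z)).count z = (t.takeWhile (· == z)).length :=
    List.count_eq_length.2 (fun b hb => by
      have := List.mem_takeWhile_imp hb; simp at this; omega)
  have : (t.dropWhile (· == z)).count z = 0 := by omega
  exact List.count_eq_zero.1 this

theorem mc_eq_foldl_max : ∀ (n : Nat) (zs : List Int), zs.length ≤ n →
    List.Pairwise (· ≤ ·) zs →
    mc zs = (zs.map (fun y => (zs.count y : Int))).foldl max 0 := by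
  intro n
  induction n with
  | zero => intro zs hl _; rw [List.length_eq_zero_iff.1 (Nat.le_zero.1 hl)]; simp [mc]
  | succ n ih =>
      intro zs hl hp
      rcases zs with _ | ⟨z, t⟩
      · simp [mc]
      · have hpt : List.Pairwise (· ≤ ·) t := (List.pairwise_cons.1 hp).2
        have hpt1 : List.Pairwise (· ≤ ·) (t.dropWhile (· == z)) :=
          hpt.sublist (List.dropWhile_sublist _)
        have hlen : (t.dropWhile (· == z)).length ≤ n := by
          have := List.length_dropWhile_le (· == z) t
          simp only [List.length_cons] at hl; omega
        have hih := ih (t.dropWhile (· == z)) hlen hpt1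
        obtain ⟨h1, h2⟩ := sorted_count_split t z hp
        have hznot := not_mem_dropWhile_sorted t z hp
        -- split the mapped list at the leading run
        have hsplit : t = t.takeWhile (· == z) ++ t.dropWhile (· == z) :=
          (List.takeWhile_append_dropWhile (p := (· == z)) (l := t)).symm
        set tw := t.takeWhile (· == z) with htw
        set t1 := t.dropWhile (· == z) with ht1
        set c : Int → Int := fun y => (((z :: t).count y : Nat) : Int) with hc
        have hconsl : z :: t = (z :: tw) ++ t1 := by
          rw [List.cons_append, ← hsplit]
        have hmapc : (z :: t).map c = ((z :: tw).map c) ++ (t1.map c) := by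
          conv_lhs => rw [hconsl]
          rw [List.map_append]
        have hmapt1 : t1.map c = t1.map (fun y => ((t1.count y : Nat) : Int)) := by
          apply List.map_congr_left
          intro y hy
          have hyz : y ≠ z := fun h => hznot (h ▸ hy)
          have h3 : (z :: t).count y = t.count y := by
            simp [List.count_cons]; omega
          simp only [hc, h3, h2 y hyz]
        have hM1 : ((z :: tw).map c).foldl max 0 = 1 + (t.count z : Int) := by
          apply foldl_max_const
          · have := Int.natCast_nonneg (t.count z); omega
          · intro x hx
            rcases List.mem_map.1 hx with ⟨y, hy, hxy⟩
            have hyz : y = z := by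
              rcases List.mem_cons.1 hy with h | h
              · exact h
              · have := List.mem_takeWhile_imp h; simpa using this
            rw [← hxy, hyz]
            simp only [hc, List.count_cons_self]
            push_cast; ring
          · simp
        rw [show (List.map (fun y => ((List.count y (z :: t) : Nat) : Int)) (z :: t)) = (z :: t).map c from rfl,
            hmapc, List.foldl_append, hM1]
        have := foldl_max_max (t1.map c) (1 + (t.count z : Int)) 0
        rw [show (max (1 + (t.count z : Int)) 0) = 1 + (t.count z : Int) by
              have := Int.natCast_nonneg (t.count z); omega] at this
        rw [this, hmapt1, ← hih]
        simp only [mc]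
        rw [← ht1]
  -- goal now: max (1 + count) (mc t1) = max (1 + count) (mc t1)

-- the run-length loop invariant on a sorted tail
theorem scanRuns_invariant : ∀ (zs : List Int) (best run y : Int),
    List.Pairwise (· ≤ ·) (y :: zs) → run ≤ best → 0 ≤ best →
    scanRuns zs best run (some y) =
      max best (max (run + (zs.count y : Int)) (mc (zs.dropWhile (· == y)))) := by
  intro zs
  induction zs with
  | nil =>
      intro best run y _ hrb hb
      simp [scanRuns, mc]
      omega
  | cons z t ih =>
      intro best run y hp hrb hb
      by_cases hz : z = y
      · subst hz
        have hpz : List.Pairwise (· ≤ ·) (z :: t) := (List.pairwise_cons.1 hp).2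
        have heq : (some z == some z) = true := by simp
        simp only [scanRuns, heq, if_true]
        rw [if_lt_eq_max]
        have := ih (max best (run + 1)) (run + 1) z hpz (le_max_right _ _) (by omega)
        rw [this]
        have hdw : (z :: t).dropWhile (· == z) = t.dropWhile (· == z) := by
          simp
        rw [hdw]
        have hcnt : ((z :: t).count z : Int) = (t.count z : Int) + 1 := by
          simp
        rw [hcnt]
        have hC := Int.natCast_nonneg (t.count z)
        have hX := mc_nonneg (t.dropWhile (· == z))
        simp only [max_def]; split_ifs <;> omega
      · have hpz : List.Pairwise (· ≤ ·) (z :: t) := (List.pairwise_cons.1 hp).2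
        have hne : (some z == some y) = false := by simp [hz]
        simp only [scanRuns, hne, Bool.false_eq_true, if_false]
        rw [if_lt_eq_max]
        have := ih (max best 1) 1 z hpz (le_max_right _ _) (by omega)
        rw [this]
        have hmc : max (1 + (t.count z : Int)) (mc (t.dropWhile (· == z))) = mc (z :: t) := by
          simp only [mc]
        rw [hmc]
        have hdw : (z :: t).dropWhile (· == y) = z :: t := by
          simp [hz]
        rw [hdw]
        have hycnt : (z :: t).count y = 0 := by
          apply List.count_eq_zero.2
          intro hmem
          rcases List.mem_cons.1 hmem with h | h
          · exact hz h.symm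
          · have hyz : y ≤ z := (List.pairwise_cons.1 hp).1 z (List.mem_cons_self ..)
            have hzy : z ≤ y := (List.pairwise_cons.1 hpz).1 y h
            have hyt : y ≤ y := le_refl y
            exact hz (le_antisymm hzy (by
              have := (List.pairwise_cons.1 hp).1 y (List.mem_cons_of_mem _ h)
              omega))
        rw [hycnt]
        have hmcp := mc_cons_pos z t
        simp only [Nat.cast_zero, max_def]; split_ifs <;> omega

theorem scanRuns_eq_mc (zs : List Int) (hp : List.Pairwise (· ≤ ·) zs) :
    scanRuns zs 0 0 none = mc zs := by
  rcases zs with _ | ⟨y, t⟩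
  · simp [scanRuns, mc]
  · have hne : (some y == (none : Option Int)) = false := by simp
    simp only [scanRuns, hne, Bool.false_eq_true, if_false]
    norm_num
    have := scanRuns_invariant t 1 1 y hp le_rfl (by omega)
    rw [this]
    have hC := Int.natCast_nonneg (t.count y)
    have hX := mc_nonneg (t.dropWhile (· == y))
    simp only [mc]
    simp only [max_def]; split_ifs <;> omega

-- A's value, as a max-fold over the distinct hash values' counts
theorem lbin_eq_max_counts (S : List Int) (a b p m : Int) :
    lbin S a b p m =
      ((PySem.Set.ofList (S.map (fun x => PySem.Int.mod (PySem.Int.mod (a * x + b) p) m))).map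
        (fun y => ((S.map (fun x => PySem.Int.mod (PySem.Int.mod (a * x + b) p) m)).count y : Int))).foldl
        max 0 := by
  set ys := S.map (fun x => PySem.Int.mod (PySem.Int.mod (a * x + b) p) m) with hys
  have hbuild : S.foldl (fun T x =>
      let y := PySem.Int.mod (PySem.Int.mod (a * x + b) p) m
      if T.contains y then T.insert y (T.getD y 0 + 1) else T.insert y 1)
      PySem.Dict.empty = PySem.Dict.counter ys := by
    have h := build_eq_counter ys
    rw [hys, List.foldl_map] at h
    exact h
  show (S.foldl _ PySem.Dict.empty).keys.foldl _ 0 = _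
  rw [hbuild, PySem.Dict.keys_counter]
  have : ∀ (l : List Int),
      l.foldl (fun mx y => if mx < (PySem.Dict.counter ys).getD y 0 then (PySem.Dict.counter ys).getD y 0 else mx) 0 =
        (l.map (fun y => (ys.count y : Int))).foldl max 0 := by
    intro l
    rw [List.foldl_map]
    apply PySem.List.foldl_congr_mem
    intro acc x _
    rw [PySem.Dict.getD_counter, if_lt_eq_max]
  exact this _

-- ===== VERDICT (by name: the statement is the Claim_ definition above) =====
theorem lbin_spec : Claim_equal_lbin := by
  intro S a b p m _ _
  unfold Spec_lbin lbin_alt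
  set ys := S.map (fun x => PySem.Int.mod (PySem.Int.mod (a * x + b) p) m) with hys
  set zs := PySem.List.sorted ys id with hzs
  have hperm : zs.Perm ys := PySem.List.sorted_perm ys id false
  have hpw : List.Pairwise (· ≤ ·) zs := by
    have := PySem.List.sorted_pairwise ys id
    simpa using this
  rw [lbin_eq_max_counts]
  show _ = scanRuns zs 0 0 none
  rw [scanRuns_eq_mc zs hpw, mc_eq_foldl_max zs.length zs le_rfl hpw]
  apply foldl_max_congr
  intro x
  simp only [List.mem_map, PySem.Set.mem_ofList]
  constructor
  · rintro ⟨y, hy, hxy⟩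
    exact ⟨y, hperm.mem_iff.2 (List.mem_map.2 hy), by rw [hperm.count_eq]; exact hxy⟩
  · rintro ⟨y, hy, hxy⟩
    exact ⟨y, List.mem_map.1 (hperm.mem_iff.1 hy), by rw [← hperm.count_eq]; exact hxy⟩
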